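-- pv_equiv track=rewrite | github.com/Velyxius/reparticion-optima-cupos | VectorANumero.py | vector_I_i
-- ===== SOURCE A (Python) =====
-- def vector_I_i(materias: dict[str, int]) -> list[int]:
--     I_i_list = [1]
--     K = len(materias)
--     cupos = [cupo for cupo in materias.values()]
--
--     I_i = 1
--
--     for j in range(K - 1):
--         m_j = cupos[(K - 1) - j]
--         I_i *= m_j + 1
--         I_i_list.insert(0, I_i)
--
--     return I_i_list
-- ===== SOURCE B (Python) =====
-- def _prod_plus_one(xs):
--     p = 1
--     for x in xs:
--         p *= x + 1
--     return p
--
--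
-- def vector_I_i(materias: dict[str, int]) -> list[int]:
--     # Each element i is computed independently as the product of (value+1)
--     # over the suffix cupos[i+1:]; no running accumulator across positions.
--     cupos = list(materias.values())
--     K = len(cupos)
--     return [_prod_plus_one(cupos[i + 1:]) for i in range(K)] or [1]
-- ===== Notes on version B (the rewrite author's own statement) =====
-- stated objective: alternative
-- what changed: Computes every output element independently as the product of (value+1) over the suffix cupos[i+1:] (a per-index slice-and-multiply comprehension), instead of A's single backward pass that threads a running accumulator and prepends with insert(0, ...).
import Mathlib
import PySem

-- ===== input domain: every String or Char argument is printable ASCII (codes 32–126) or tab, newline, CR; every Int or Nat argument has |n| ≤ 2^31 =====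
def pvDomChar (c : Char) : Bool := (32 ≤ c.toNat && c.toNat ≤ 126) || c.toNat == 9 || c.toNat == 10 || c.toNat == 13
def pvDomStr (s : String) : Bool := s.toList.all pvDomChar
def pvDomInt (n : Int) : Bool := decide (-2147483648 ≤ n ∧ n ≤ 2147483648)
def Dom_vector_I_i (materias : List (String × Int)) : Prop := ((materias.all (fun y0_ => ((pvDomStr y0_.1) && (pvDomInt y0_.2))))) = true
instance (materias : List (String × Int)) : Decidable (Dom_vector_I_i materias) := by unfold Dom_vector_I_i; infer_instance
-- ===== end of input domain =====

-- B computes each element independently as a per-suffix product instead of A's single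
-- backward accumulator pass with insert(0, ...); objective: a genuinely different
-- decomposition of the same computation (alternative, similar cost).

-- ===== PORT A =====
def stepA (cupos : List Int) (K : Int) (st : List Int × Int) (j : Int) : List Int × Int :=
  let m := PySem.List.pyGetD cupos ((K - 1) - j) 0
  let I := st.2 * (m + 1)
  (I :: st.1, I)

def vector_I_i (materias : List (String × Int)) : List Int :=
  ((PySem.List.pyRange 0 ((materias.length : Int) - 1) 1).foldl
    (stepA (materias.map (fun p => p.2)) (materias.length : Int)) ([1], 1)).1

-- ===== PORT B =====
def prodPlusOne (xs : List Int) : Int := xs.foldl (fun p x => p * (x + 1)) 1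

def vector_I_i_alt (materias : List (String × Int)) : List Int :=
  let cupos := materias.map (fun p => p.2)
  let r := (PySem.List.pyRange 0 (cupos.length : Int) 1).map
             (fun i => prodPlusOne (PySem.List.slice cupos (some (i + 1)) none))
  if r = [] then [1] else r

-- ===== PRECONDITION & SPEC =====  (A is total: no Pre_)
def Spec_vector_I_i (materias : List (String × Int)) (out : List Int) : Prop := out = vector_I_i_alt materias
instance (materias : List (String × Int)) (out : List Int) : Decidable (Spec_vector_I_i materias out) := by unfold Spec_vector_I_i; infer_instance

-- ===== CLAIM (what is proved, stated in full; the proofs are below) =====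
def Claim_equal_vector_I_i : Prop := ∀ (materias : List (String × Int)), Dom_vector_I_i materias → Spec_vector_I_i materias (vector_I_i materias)

-- ===== LEMMAS AND PROOFS =====

-- Proof-side characterisation: the list of suffix products, ending in 1.
def suffixProdB : List Int → List Int
  | [] => [1]
  | c :: cs =>
    let rest := suffixProdB cs
    ((c + 1) * rest.headD 1) :: rest

lemma foldl_mul_factor (xs : List Int) (a : Int) :
    xs.foldl (fun p x => p * (x + 1)) a = a * prodPlusOne xs := by
  induction xs generalizing a with
  | nil => simp [prodPlusOne]
  | cons x xs ih =>
    simp only [List.foldl_cons, prodPlusOne]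
    rw [ih, ih (1 * (x + 1))]
    ring

lemma prodPlusOne_cons (d : Int) (ds : List Int) :
    prodPlusOne (d :: ds) = (d + 1) * prodPlusOne ds := by
  show (d :: ds).foldl (fun p x => p * (x + 1)) 1 = (d + 1) * prodPlusOne ds
  rw [List.foldl_cons, foldl_mul_factor]
  ring

lemma headD_suffixProdB (ds : List Int) : (suffixProdB ds).headD 1 = prodPlusOne ds := by
  induction ds with
  | nil => simp [suffixProdB, prodPlusOne]
  | cons d ds ih =>
    simp only [suffixProdB, List.headD_cons, ih]
    rw [prodPlusOne_cons]

lemma suffixProdB_eq_map (ds : List Int) :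
    suffixProdB ds = (List.range (ds.length + 1)).map (fun j => prodPlusOne (ds.drop j)) := by
  induction ds with
  | nil => simp [suffixProdB, prodPlusOne]
  | cons d ds ih =>
    rw [List.range_succ_eq_map]
    simp only [suffixProdB, List.map_cons, List.map_map, List.drop_zero]
    rw [headD_suffixProdB, ← prodPlusOne_cons, ih, List.length_cons]
    refine congrArg _ (List.map_congr_left ?_)
    intro j _
    simp [Function.comp, List.drop_succ_cons]

lemma loop_inv (cs : List Int) (t : Nat) (h1 : 1 ≤ cs.length) (ht : t ≤ cs.length - 1) :
    (PySem.List.pyRange 0 (t : Int) 1).foldl (stepA cs (cs.length : Int)) ([1], 1)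
      = (suffixProdB (cs.drop (cs.length - t)),
         (suffixProdB (cs.drop (cs.length - t))).headD 1) := by
  induction t with
  | zero =>
    simp [List.drop_length, suffixProdB]
  | succ t ih =>
    have ht' : t ≤ cs.length - 1 := by omega
    have hidx : cs.length - 1 - t < cs.length := by omega
    have hsucc : ((t : Int) + 1) = ((t + 1 : Nat) : Int) := by push_cast; ring
    rw [← hsucc, PySem.List.pyRange_one_succ_right (by positivity),
        List.foldl_append, ih ht']
    have hdrop : cs.drop (cs.length - (t + 1))
        = cs[cs.length - 1 - t] :: cs.drop (cs.length - t) := by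
      have h2 : cs.length - t = cs.length - 1 - t + 1 := by omega
      have h3 : cs.length - (t + 1) = cs.length - 1 - t := by omega
      rw [h3, List.drop_eq_getElem_cons hidx, h2]
    have hget : PySem.List.pyGetD cs (((cs.length : Int) - 1) - (t : Int)) 0
        = cs[cs.length - 1 - t] := by
      have hcast : ((cs.length : Int) - 1) - (t : Int) = ((cs.length - 1 - t : Nat) : Int) := by
        omega
      rw [hcast, PySem.List.pyGetD_natCast]
      simp [List.getElem?_eq_getElem hidx]
    simp only [List.foldl_cons, List.foldl_nil, stepA, hdrop, hget, suffixProdB]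
    simp [mul_comm]

lemma alt_map_eq (cs : List Int) :
    (PySem.List.pyRange 0 (cs.length : Int) 1).map
        (fun i => prodPlusOne (PySem.List.slice cs (some (i + 1)) none))
      = (List.range cs.length).map (fun k => prodPlusOne (cs.drop (k + 1))) := by
  rw [PySem.List.pyRange_one]
  simp only [sub_zero, Int.toNat_natCast, List.map_map]
  refine List.map_congr_left ?_
  intro k _
  have : (0 : Int) + (k : Int) + 1 = ((k + 1 : Nat) : Int) := by push_cast; ring
  simp only [Function.comp_apply, this, PySem.List.slice_from_natCast]

-- ===== VERDICT (by name: the statement is the Claim_ definition above) =====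
theorem vector_I_i_spec : Claim_equal_vector_I_i := by
  intro materias _
  unfold Spec_vector_I_i vector_I_i vector_I_i_alt
  dsimp only
  set cs : List Int := materias.map (fun p => p.2) with hcs
  have hlen : materias.length = cs.length := by simp [hcs]
  rw [hlen, alt_map_eq]
  rcases Nat.eq_zero_or_pos cs.length with h0 | hpos
  · have hnil : cs = [] := List.eq_nil_of_length_eq_zero h0
    rw [hnil]
    simp
  · have hcast : ((cs.length : Int) - 1) = ((cs.length - 1 : Nat) : Int) := by omega
    rw [hcast, loop_inv cs (cs.length - 1) hpos (le_refl _)]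
    have h1 : cs.length - (cs.length - 1) = 1 := by omega
    rw [h1]
    have hne : (List.range cs.length).map (fun k => prodPlusOne (cs.drop (k + 1))) ≠ [] := by
      have hL : ((List.range cs.length).map
          (fun k => prodPlusOne (cs.drop (k + 1)))).length = cs.length := by simp
      intro h
      rw [h] at hL
      simp at hL
      omega
    rw [if_neg hne, suffixProdB_eq_map]
    have hlen1 : (cs.drop 1).length + 1 = cs.length := by
      simp; omega
    rw [hlen1]
    refine List.map_congr_left ?_
    intro k _
    rw [List.drop_drop, Nat.add_comm]
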